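-- pv_equiv track=rewrite | github.com/streethooper11/Recommender | ProcessList.py | createDictionary_ClustersAndActors
-- ===== SOURCE A (Python) =====
-- def createDictionary_ClustersAndActors(clusters, actors):
--     """
--     Creates a dictionary from a list of clusters and a list of actors
--
--     :param actors: List of actors
--     :param clusters: List of clusters
--     :return: A dictionary that consists of clusters as keys and a dictionary of actors and count as values
--     """
--
--     result = dict()
--
--     for i in range(len(clusters)):
--         # make sure a cluster is assigned
--         if clusters[i] != -1:
--             # create a new list if this is the first time the cluster appears
--             if clusters[i] not in result:
--                 result[clusters[i]] = dict()
--
--             # create a new key-value pair if this is the first time the actor appears in the cluster with count as 0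
--             if actors[i] not in result[clusters[i]]:
--                 result[clusters[i]][actors[i]] = 0
--
--             # increase count by 1
--             result[clusters[i]][actors[i]] += 1
--
--     return result
-- ===== SOURCE B (Python) =====
-- def createDictionary_ClustersAndActors(clusters, actors):
--     # Two-pass decomposition: first group actor names by cluster id (index-based,
--     # skipping unassigned -1), then reshape each group's list into a count dict.
--     groups = {}
--     for i in range(len(clusters)):
--         if clusters[i] != -1:
--             groups.setdefault(clusters[i], []).append(actors[i])
--     result = {}
--     for c, lst in groups.items():
--         counts = {}
--         for a in lst:
--             counts[a] = counts.get(a, 0) + 1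
--         result[c] = counts
--     return result
-- ===== Notes on version B (the rewrite author's own statement) =====
-- stated objective: alternative
-- what changed: A increments nested counts in one fused pass; B first builds an index-based grouping of actor names per cluster, then a second pass reshapes each group's list into a count dict.
import Mathlib
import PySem

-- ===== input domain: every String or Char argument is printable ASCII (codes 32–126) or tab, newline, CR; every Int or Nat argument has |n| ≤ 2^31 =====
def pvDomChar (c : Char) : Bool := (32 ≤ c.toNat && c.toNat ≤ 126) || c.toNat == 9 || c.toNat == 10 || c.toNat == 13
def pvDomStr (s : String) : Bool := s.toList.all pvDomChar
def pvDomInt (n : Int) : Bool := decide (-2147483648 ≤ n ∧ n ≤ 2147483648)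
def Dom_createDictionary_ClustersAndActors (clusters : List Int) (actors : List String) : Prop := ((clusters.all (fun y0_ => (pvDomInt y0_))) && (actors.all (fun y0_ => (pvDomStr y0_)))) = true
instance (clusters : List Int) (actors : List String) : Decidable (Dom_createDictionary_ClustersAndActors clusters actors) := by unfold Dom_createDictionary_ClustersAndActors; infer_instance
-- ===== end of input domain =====

-- B differs from A by decomposition only: group actor names per cluster first, count second; same return value.

-- ===== PORT A =====
-- one iteration of A's loop body (i is the range index)
def pvStepA (clusters : List Int) (actors : List String)
    (r : PySem.Dict Int (PySem.Dict String Int)) (i : Int) : PySem.Dict Int (PySem.Dict String Int) :=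
  let c := PySem.List.pyGetD clusters i 0
  if c ≠ -1 then
    let r1 := if r.contains c then r else r.insert c PySem.Dict.empty
    let a := PySem.List.pyGetD actors i ""
    let inner := r1.getD c PySem.Dict.empty
    let inner1 := if inner.contains a then inner else inner.insert a 0
    r1.insert c (inner1.modify a 0 (· + 1))
  else r

def createDictionary_ClustersAndActors (clusters : List Int) (actors : List String) : List (Int × List (String × Int)) :=
  ((PySem.List.pyRange 0 clusters.length 1).foldl (pvStepA clusters actors)
    PySem.Dict.empty).items.map (fun p => (p.1, p.2.items))

-- ===== PORT B =====
-- pass 1 loop body: groups.setdefault(clusters[i], []).append(actors[i])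
def pvStepB (clusters : List Int) (actors : List String)
    (g : PySem.Dict Int (List String)) (i : Int) : PySem.Dict Int (List String) :=
  let c := PySem.List.pyGetD clusters i 0
  if c ≠ -1 then g.modify c [] (· ++ [PySem.List.pyGetD actors i ""]) else g

def createDictionary_ClustersAndActors_alt (clusters : List Int) (actors : List String) : List (Int × List (String × Int)) :=
  let groups := (PySem.List.pyRange 0 clusters.length 1).foldl (pvStepB clusters actors) PySem.Dict.empty
  (groups.items.foldl
    (fun res p => res.insert p.1 (p.2.foldl (fun d a => d.modify a 0 (· + 1)) PySem.Dict.empty))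
    PySem.Dict.empty).items.map (fun p => (p.1, p.2.items))

-- ===== PRECONDITION & SPEC =====
-- Pre_ excludes exactly the inputs where Python A raises IndexError: some index with an
-- assigned cluster (≠ -1) has no corresponding entry in actors.
def Pre_createDictionary_ClustersAndActors (clusters : List Int) (actors : List String) : Prop :=
  ∀ i : Nat, i < clusters.length → clusters.getD i 0 ≠ -1 → i < actors.length
instance (clusters : List Int) (actors : List String) : Decidable (Pre_createDictionary_ClustersAndActors clusters actors) := by unfold Pre_createDictionary_ClustersAndActors; infer_instance
def pvWitness_createDictionary_ClustersAndActors : List Int × List String := ([1, -1, 1, 2], ["a", "b", "a", "c"])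

def Spec_createDictionary_ClustersAndActors (clusters : List Int) (actors : List String) (out : List (Int × List (String × Int))) : Prop := out = createDictionary_ClustersAndActors_alt clusters actors
instance (clusters : List Int) (actors : List String) (out : List (Int × List (String × Int))) : Decidable (Spec_createDictionary_ClustersAndActors clusters actors out) := by unfold Spec_createDictionary_ClustersAndActors; infer_instance

-- ===== CLAIM (what is proved, stated in full; the proofs are below) =====
def Claim_equal_createDictionary_ClustersAndActors : Prop := ∀ (clusters : List Int) (actors : List String), Dom_createDictionary_ClustersAndActors clusters actors → Pre_createDictionary_ClustersAndActors clusters actors → Spec_createDictionary_ClustersAndActors clusters actors (createDictionary_ClustersAndActors clusters actors)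

-- ===== LEMMAS AND PROOFS =====

-- Θ maps B's grouping state to A's counting state: count each group's list.
def pvTheta (g : PySem.Dict Int (List String)) : PySem.Dict Int (PySem.Dict String Int) :=
  PySem.Dict.mk (g.items.map (fun p => (p.1, PySem.Dict.counter p.2)))

lemma pvTheta_get? (g : PySem.Dict Int (List String)) (c : Int) :
    (pvTheta g).get? c = (g.get? c).map PySem.Dict.counter := by
  obtain ⟨l⟩ := g
  induction l with
  | nil => rfl
  | cons p rest ih =>
    simp only [pvTheta, List.map_cons] at *
    rw [PySem.Dict.get?_mk_cons, PySem.Dict.get?_mk_cons]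
    by_cases h : p.1 == c
    · simp [h]
    · simp only [h, if_false, Bool.false_eq_true]; exact ih

lemma pvTheta_contains (g : PySem.Dict Int (List String)) (c : Int) :
    (pvTheta g).contains c = g.contains c := by
  rw [PySem.Dict.contains_eq_isSome_get?, PySem.Dict.contains_eq_isSome_get?, pvTheta_get?]
  cases g.get? c <;> rfl

lemma pvTheta_getD (g : PySem.Dict Int (List String)) (c : Int) :
    (pvTheta g).getD c PySem.Dict.empty = PySem.Dict.counter (g.getD c []) := by
  rw [PySem.Dict.getD_eq_get?_getD, PySem.Dict.getD_eq_get?_getD, pvTheta_get?]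
  cases g.get? c <;> rfl

lemma pvTheta_insert (g : PySem.Dict Int (List String)) (c : Int) (L : List String) :
    (pvTheta g).insert c (PySem.Dict.counter L) = pvTheta (g.insert c L) := by
  apply PySem.Dict.ext
  rw [PySem.Dict.items_insert, pvTheta_contains]
  by_cases h : g.contains c
  · simp only [pvTheta, h, if_true, PySem.Dict.items_insert]
    rw [List.map_map, List.map_map]
    apply List.map_congr_left
    intro p _
    by_cases hp : p.1 = c <;> simp [hp]
  · simp only [pvTheta, h, if_false, Bool.false_eq_true, PySem.Dict.items_insert]
    simp

lemma pvCount_step (L : List String) (a : String) :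
    (if (PySem.Dict.counter L).contains a then PySem.Dict.counter L
     else (PySem.Dict.counter L).insert a 0).modify a 0 (· + 1) = PySem.Dict.counter (L ++ [a]) := by
  rw [PySem.Dict.counter_append_singleton]
  by_cases h : (PySem.Dict.counter L).contains a
  · simp [h]
  · simp only [h, if_false, Bool.false_eq_true]
    unfold PySem.Dict.modify
    rw [PySem.Dict.getD_insert_self, PySem.Dict.insert_insert_self,
        PySem.Dict.getD_of_not_contains _ _ (by simpa using h)]

lemma pvStep_comm (clusters : List Int) (actors : List String)
    (g : PySem.Dict Int (List String)) (i : Int) :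
    pvStepA clusters actors (pvTheta g) i = pvTheta (pvStepB clusters actors g i) := by
  unfold pvStepA pvStepB
  by_cases hci : PySem.List.pyGetD clusters i 0 = -1
  · simp [hci]
  · simp only [hci, ne_eq, not_false_iff, if_true, pvTheta_contains]
    by_cases hg : g.contains (PySem.List.pyGetD clusters i 0)
    · rw [if_pos hg, pvTheta_getD, pvCount_step, pvTheta_insert]
      rfl
    · rw [if_neg (by simp [hg]), PySem.Dict.getD_insert_self,
          show (if (PySem.Dict.empty : PySem.Dict String Int).contains (PySem.List.pyGetD actors i "") = true
                then (PySem.Dict.empty : PySem.Dict String Int)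
                else PySem.Dict.empty.insert (PySem.List.pyGetD actors i "") 0).modify
                  (PySem.List.pyGetD actors i "") 0 (· + 1)
               = PySem.Dict.counter ([] ++ [PySem.List.pyGetD actors i ""]) from pvCount_step [] _,
          PySem.Dict.insert_insert_self, pvTheta_insert]
      unfold PySem.Dict.modify
      rw [PySem.Dict.getD_of_not_contains _ _ (by simpa using hg)]

lemma pvFold_comm (clusters : List Int) (actors : List String) (l : List Int)
    (g : PySem.Dict Int (List String)) :
    l.foldl (pvStepA clusters actors) (pvTheta g) = pvTheta (l.foldl (pvStepB clusters actors) g) := by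
  induction l generalizing g with
  | nil => rfl
  | cons x xs ih => simp only [List.foldl_cons, pvStep_comm, ih]

lemma pvFoldB_nodup (clusters : List Int) (actors : List String) (l : List Int)
    (g : PySem.Dict Int (List String)) (h : g.keys.Nodup) :
    (l.foldl (pvStepB clusters actors) g).keys.Nodup := by
  induction l generalizing g with
  | nil => exact h
  | cons x xs ih =>
    apply ih
    unfold pvStepB
    by_cases hc : PySem.List.pyGetD clusters x 0 = -1
    · simpa [hc] using h
    · simp only [hc, ne_eq, not_false_iff, if_true]
      rw [show ((g.modify (PySem.List.pyGetD clusters x 0) [] (· ++ [PySem.List.pyGetD actors x ""])).keys).Nodup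
            ↔ ((g.insert (PySem.List.pyGetD clusters x 0)
                ((· ++ [PySem.List.pyGetD actors x ""]) (g.getD (PySem.List.pyGetD clusters x 0) []))).keys).Nodup
          from by rw [PySem.Dict.keys_modify]]
      exact PySem.Dict.nodup_keys_insert _ _ _ h

-- ===== VERDICT (by name: the statement is the Claim_ definition above) =====
theorem createDictionary_ClustersAndActors_spec : Claim_equal_createDictionary_ClustersAndActors := by
  intro clusters actors _ _
  unfold Spec_createDictionary_ClustersAndActors
  unfold createDictionary_ClustersAndActors createDictionary_ClustersAndActors_alt
  dsimp only
  rw [show (PySem.List.pyRange 0 (clusters.length : Int) 1).foldl (pvStepA clusters actors) PySem.Dict.empty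
        = pvTheta ((PySem.List.pyRange 0 (clusters.length : Int) 1).foldl (pvStepB clusters actors) PySem.Dict.empty)
      from pvFold_comm clusters actors _ PySem.Dict.empty]
  rw [PySem.Dict.items_foldl_insert_fresh _ (Prod.fst : Int × List String → Int)
        (fun (p : Int × List String) => p.2.foldl (fun (d : PySem.Dict String Int) a => d.modify a 0 (· + 1)) PySem.Dict.empty) PySem.Dict.empty
        (by intro a _; rfl)
        (pvFoldB_nodup clusters actors _ _ PySem.Dict.nodup_keys_empty)]
  simp only [pvTheta, List.map_map, PySem.Dict.empty, List.nil_append]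
  rfl
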